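-- pv_equiv track=rewrite | github.com/deepakchoudhary-dc/Slait_AI_Prompt_analyzer | src/workflow_eval/parsing.py | _looks_like_unfenced_code
-- ===== SOURCE A (Python) =====
-- def _looks_like_unfenced_code(content: str) -> bool:
--     lines = [line.strip() for line in content.splitlines() if line.strip()]
--     if len(lines) < 2:
--         return False
--
--     code_markers = (
--         "def ",
--         "class ",
--         "import ",
--         "from ",
--         "if ",
--         "for ",
--         "while ",
--         "return ",
--         "try:",
--         "except ",
--     )
--     marker_hits = sum(1 for line in lines if line.startswith(code_markers))
--     punctuation_hits = sum(
--         1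
--         for line in lines
--         if line.endswith(":") or ("(" in line and ")" in line)
--     )
--     return marker_hits >= 1 and punctuation_hits >= 1
-- ===== SOURCE B (Python) =====
-- def _looks_like_unfenced_code(content: str) -> bool:
--     # Single character-level scan: no line list is ever built.  Per line we keep
--     # O(1) state: the first 7 chars after leading whitespace (buf), the length of
--     # the stripped line (striplen), its last non-whitespace char, and whether
--     # "(" / ")" occurred.  All markers have length <= 7, so buf[:striplen]
--     # decides line.startswith(markers) for the stripped line.
--     markers = (
--         "def ",
--         "class ",
--         "import ",
--         "from ",
--         "if ",
--         "for ",
--         "while ",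
--         "return ",
--         "try:",
--         "except ",
--     )
--     nonempty = 0
--     has_marker = False
--     has_punct = False
--
--     pos = 0          # len of the line so far with leading whitespace dropped
--     striplen = 0     # len of the stripped line so far
--     buf = []         # first <=7 chars after leading whitespace
--     last = " "       # last non-whitespace char of the line
--     seen_open = False
--     seen_close = False
--
--     def finish():
--         nonlocal nonempty, has_marker, has_punct
--         nonlocal pos, striplen, buf, last, seen_open, seen_close
--         if striplen > 0:
--             nonempty += 1
--             if "".join(buf[:striplen]).startswith(markers):
--                 has_marker = True
--             if last == ":" or (seen_open and seen_close):
--                 has_punct = True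
--         pos = 0
--         striplen = 0
--         buf = []
--         last = " "
--         seen_open = False
--         seen_close = False
--
--     i = 0
--     n = len(content)
--     while i < n:
--         ch = content[i]
--         if ch == "\n" or ch == "\r":
--             finish()
--             if ch == "\r" and i + 1 < n and content[i + 1] == "\n":
--                 i += 1
--         elif pos > 0 or not ch.isspace():
--             pos += 1
--             if len(buf) < 7:
--                 buf.append(ch)
--             if not ch.isspace():
--                 striplen = pos
--                 last = ch
--                 if ch == "(":
--                     seen_open = True
--                 elif ch == ")":
--                     seen_close = True
--         i += 1
--     finish()
--     return nonempty >= 2 and has_marker and has_punct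
-- ===== Notes on version B (the rewrite author's own statement) =====
-- stated objective: alternative
-- what changed: A builds the stripped non-empty line list and runs two counting passes over it; B never materialises any line list: it streams over the characters once with O(1) per-line state (a 7-char prefix buffer, stripped length, last non-whitespace char, paren flags) and folds the line verdicts into a counter and two flags at each line break.
import Mathlib
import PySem

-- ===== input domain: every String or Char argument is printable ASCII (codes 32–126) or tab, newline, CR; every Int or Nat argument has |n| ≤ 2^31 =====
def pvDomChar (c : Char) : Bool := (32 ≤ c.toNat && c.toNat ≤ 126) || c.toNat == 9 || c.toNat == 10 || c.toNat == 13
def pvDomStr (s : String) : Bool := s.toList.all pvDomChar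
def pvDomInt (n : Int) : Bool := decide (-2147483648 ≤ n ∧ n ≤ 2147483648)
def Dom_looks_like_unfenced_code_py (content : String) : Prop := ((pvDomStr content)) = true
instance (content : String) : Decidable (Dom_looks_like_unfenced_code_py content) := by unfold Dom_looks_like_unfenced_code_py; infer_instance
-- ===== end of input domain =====

-- B replaces A's "build the stripped line list + two counting passes" by one
-- character-level scan with O(1) per-line state; no line list is ever built.

-- ===== PORT A =====
def pvMarkersA : List String :=
  ["def ", "class ", "import ", "from ", "if ", "for ", "while ", "return ", "try:", "except "]

def looks_like_unfenced_code_py (content : String) : Bool :=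
  let lines := ((PySem.Str.splitlines content).filter
      (fun line => PySem.Str.strip line ≠ "")).map PySem.Str.strip
  if lines.length < 2 then false
  else
    let marker_hits := lines.foldl
      (fun acc line => if pvMarkersA.any (fun m => PySem.Str.startswith line m) then acc + 1 else acc) 0
    let punctuation_hits := lines.foldl
      (fun acc line =>
        if PySem.Str.endswith line ":" || (PySem.Str.isIn "(" line && PySem.Str.isIn ")" line)
        then acc + 1 else acc) 0
    decide (marker_hits ≥ 1) && decide (punctuation_hits ≥ 1)

-- ===== PORT B =====
-- Source B's tuple of markers, as lists of chars (all of length ≤ 7)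
def pvMarkersB : List (List Char) :=
  [['d','e','f',' '], ['c','l','a','s','s',' '], ['i','m','p','o','r','t',' '],
   ['f','r','o','m',' '], ['i','f',' '], ['f','o','r',' '], ['w','h','i','l','e',' '],
   ['r','e','t','u','r','n',' '], ['t','r','y',':'], ['e','x','c','e','p','t',' ']]

-- Source B's per-line O(1) state: pos/striplen/buf/last/seen_open/seen_close
structure PvLine where
  pos : Nat
  striplen : Nat
  buf : List Char
  last : Char
  seenO : Bool
  seenC : Bool
  deriving DecidableEq, Repr

def pvLine0 : PvLine := ⟨0, 0, [], ' ', false, false⟩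

-- the body of Source B's `elif` branch (one non-break character)
def pvStep (ls : PvLine) (ch : Char) : PvLine :=
  if ls.pos > 0 || !PySem.Chars.isspace ch then
    { pos := ls.pos + 1
      buf := if ls.buf.length < 7 then ls.buf ++ [ch] else ls.buf
      striplen := if !PySem.Chars.isspace ch then ls.pos + 1 else ls.striplen
      last := if !PySem.Chars.isspace ch then ch else ls.last
      seenO := ls.seenO || (!PySem.Chars.isspace ch && ch == '(')
      seenC := ls.seenC || (!PySem.Chars.isspace ch && ch == ')') }
  else ls

-- Source B's finish(): fold the finished line's verdicts into (nonempty, has_marker, has_punct)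
def pvFinish (g : Nat × Bool × Bool) (ls : PvLine) : Nat × Bool × Bool :=
  if ls.striplen > 0 then
    (g.1 + 1,
     g.2.1 || pvMarkersB.any (fun m => PySem.Chars.startswith (ls.buf.take ls.striplen) m),
     g.2.2 || (ls.last == ':' || (ls.seenO && ls.seenC)))
  else g

-- Source B's while loop over the characters ("\r" followed by "\n" consumes both)
def pvScan : List Char → (Nat × Bool × Bool) → PvLine → Nat × Bool × Bool
  | [], g, ls => pvFinish g ls
  | c :: rest, g, ls =>
    if c = '\n' || c = '\r' then
      if c = '\r' && rest.head? == some '\n' then pvScan rest.tail (pvFinish g ls) pvLine0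
      else pvScan rest (pvFinish g ls) pvLine0
    else pvScan rest g (pvStep ls c)
  termination_by s _ _ => s.length
  decreasing_by all_goals (simp [List.length_tail]; try omega)

def looks_like_unfenced_code_py_alt (content : String) : Bool :=
  let r := pvScan content.toList (0, false, false) pvLine0
  decide (r.1 ≥ 2) && r.2.1 && r.2.2

-- ===== PRECONDITION & SPEC =====
def Spec_looks_like_unfenced_code_py (content : String) (out : Bool) : Prop := out = looks_like_unfenced_code_py_alt content
instance (content : String) (out : Bool) : Decidable (Spec_looks_like_unfenced_code_py content out) := by unfold Spec_looks_like_unfenced_code_py; infer_instance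

-- ===== CLAIM (what is proved, stated in full; the proofs are below) =====
def Claim_equal_looks_like_unfenced_code_py : Prop := ∀ (content : String), Dom_looks_like_unfenced_code_py content → Spec_looks_like_unfenced_code_py content (looks_like_unfenced_code_py content)

-- ===== LEMMAS AND PROOFS =====

-- proof-only helpers ------------------------------------------------------

-- reference line splitter: \n, \r and \r\n only (what splitlines does on the domain)
def pvConsHead (c : Char) : List (List Char) → List (List Char)
  | [] => [[c]]
  | h :: t => (c :: h) :: t

def pvSplit : List Char → List (List Char)
  | [] => []
  | c :: rest =>
    if c = '\n' || c = '\r' then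
      if c = '\r' && rest.head? == some '\n' then [] :: pvSplit rest.tail
      else [] :: pvSplit rest
    else pvConsHead c (pvSplit rest)
  termination_by s => s.length
  decreasing_by all_goals (simp [List.length_tail]; try omega)

def pvPrepend (cs : List Char) : List (List Char) → List (List Char)
  | [] => if cs.isEmpty then [] else [cs]
  | h :: t => (cs ++ h) :: t

-- char-level predicates of A (on a stripped line)
def pvPm (t : List Char) : Bool := pvMarkersB.any (fun m => PySem.Chars.startswith t m)
def pvPp (t : List Char) : Bool :=
  PySem.Chars.endswith t [':'] || (PySem.Chars.isIn ['('] t && PySem.Chars.isIn [')'] t)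

def pvContrib (cs : List Char) : Nat × Bool × Bool :=
  let t := PySem.Chars.strip cs
  if t.isEmpty then (0, false, false) else (1, pvPm t, pvPp t)

def pvBump (g c : Nat × Bool × Bool) : Nat × Bool × Bool :=
  (g.1 + c.1, g.2.1 || c.2.1, g.2.2 || c.2.2)

def pvStats (lines : List (List Char)) (g : Nat × Bool × Bool) : Nat × Bool × Bool :=
  lines.foldl (fun g cs => pvBump g (pvContrib cs)) g

-- the state abstraction of Source B's per-line variables
def pvLineState (cur : List Char) : PvLine :=
  { pos := (PySem.Chars.lstrip cur).length
    striplen := (PySem.Chars.strip cur).length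
    buf := (PySem.Chars.lstrip cur).take 7
    last := (PySem.Chars.strip cur).getLastD ' '
    seenO := cur.contains '('
    seenC := cur.contains ')' }

theorem pvLine0_eq : pvLine0 = pvLineState [] := by
  simp [pvLine0, pvLineState, PySem.Chars.lstrip, PySem.Chars.strip, PySem.Chars.rstrip]

-- basic facts about strip/lstrip/rstrip used by the state abstraction
theorem pvLstrip_snoc (xs : List Char) (c : Char) :
    PySem.Chars.lstrip (xs ++ [c])
      = if (PySem.Chars.lstrip xs).isEmpty then PySem.Chars.lstrip [c]
        else PySem.Chars.lstrip xs ++ [c] := by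
  simp [PySem.Chars.lstrip, List.dropWhile_append]

theorem pvRstrip_snoc (xs : List Char) (c : Char) :
    PySem.Chars.rstrip (xs ++ [c])
      = if PySem.Chars.isspace c then PySem.Chars.rstrip xs else xs ++ [c] := by
  by_cases h : PySem.Chars.isspace c <;>
    simp [PySem.Chars.rstrip, List.dropWhile_cons, h]

theorem pvRstrip_prefix (xs : List Char) : PySem.Chars.rstrip xs <+: xs := by
  conv_rhs => rw [← List.reverse_reverse xs]
  rw [PySem.Chars.rstrip]
  exact List.reverse_prefix.mpr (List.dropWhile_suffix _)

theorem pvMem_lstrip (c : Char) (hc : PySem.Chars.isspace c = false) (xs : List Char) :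
    c ∈ PySem.Chars.lstrip xs ↔ c ∈ xs := by
  constructor
  · intro h; exact (List.dropWhile_suffix _).subset h
  · intro h
    rw [← List.takeWhile_append_dropWhile (p := PySem.Chars.isspace) (l := xs)] at h
    rcases List.mem_append.mp h with h | h
    · exact absurd (List.mem_takeWhile_imp h) (by simp [hc])
    · exact h

theorem pvMem_rstrip (c : Char) (hc : PySem.Chars.isspace c = false) (xs : List Char) :
    c ∈ PySem.Chars.rstrip xs ↔ c ∈ xs := by
  rw [PySem.Chars.rstrip, List.mem_reverse]
  show c ∈ PySem.Chars.lstrip xs.reverse ↔ c ∈ xs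
  rw [pvMem_lstrip c hc, List.mem_reverse]

theorem pvMem_strip (c : Char) (hc : PySem.Chars.isspace c = false) (xs : List Char) :
    c ∈ PySem.Chars.strip xs ↔ c ∈ xs := by
  rw [PySem.Chars.strip, pvMem_rstrip c hc, pvMem_lstrip c hc]

theorem pvIsIn_singleton (c : Char) (t : List Char) :
    PySem.Chars.isIn [c] t = t.contains c := by
  rw [Bool.eq_iff_iff, PySem.Chars.isIn_iff_infix, List.singleton_infix_iff]
  simp

theorem pvEndswith_colon (t : List Char) (ht : t ≠ []) :
    PySem.Chars.endswith t [':'] = (t.getLastD ' ' == ':') := by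
  rcases List.eq_nil_or_concat t with rfl | ⟨xs, a, rfl⟩
  · exact absurd rfl ht
  · rw [Bool.eq_iff_iff]
    simp only [List.concat_eq_append, List.getLastD_concat, beq_iff_eq]
    simp only [PySem.Chars.endswith, List.isSuffixOf_iff_suffix]
    constructor
    · rintro ⟨s, hs⟩
      exact ((List.concat_inj.mp (by simpa [List.concat] using hs)).2).symm
    · rintro rfl; exact ⟨xs, rfl⟩

theorem pvStartswith_take7 (t m : List Char) (hm : m.length ≤ 7) :
    PySem.Chars.startswith (t.take 7) m = PySem.Chars.startswith t m := by
  rw [Bool.eq_iff_iff]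
  simp only [PySem.Chars.startswith, List.isPrefixOf_iff_prefix, List.prefix_take_iff]
  exact ⟨fun h => h.1, fun h => ⟨h, hm⟩⟩

-- step lemma: one non-break character advances the abstraction
theorem pvBeqComm (a b : Char) : (a == b) = decide (b = a) := by
  by_cases h : a = b
  · subst h; simp
  · simp [h, Ne.symm h]

theorem pvStep_eq (cur : List Char) (ch : Char) :
    pvStep (pvLineState cur) ch = pvLineState (cur ++ [ch]) := by
  by_cases hL : PySem.Chars.lstrip cur = []
  · have hS : PySem.Chars.strip cur = [] := by rw [PySem.Chars.strip, hL]; rfl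
    by_cases hws : PySem.Chars.isspace ch = true
    · have hop : ch ≠ '(' := by intro h; rw [h] at hws; exact absurd hws (by decide)
      have hcl : ch ≠ ')' := by intro h; rw [h] at hws; exact absurd hws (by decide)
      have hL' : PySem.Chars.lstrip (cur ++ [ch]) = [] := by
        rw [pvLstrip_snoc, if_pos (by simp [hL])]
        show List.dropWhile PySem.Chars.isspace [ch] = []
        rw [List.dropWhile_cons, if_pos hws, List.dropWhile_nil]
      have hS' : PySem.Chars.strip (cur ++ [ch]) = [] := by
        rw [PySem.Chars.strip, hL']; rfl
      rw [pvStep, if_neg (by simp [pvLineState, hL, hws])]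
      simp [pvLineState, hL, hL', hS, hS', List.contains_append, hop, hcl,
        Ne.symm hop, Ne.symm hcl]
    · simp only [Bool.not_eq_true] at hws
      have hL' : PySem.Chars.lstrip (cur ++ [ch]) = [ch] := by
        rw [pvLstrip_snoc, if_pos (by simp [hL])]
        show List.dropWhile PySem.Chars.isspace [ch] = [ch]
        rw [List.dropWhile_cons, if_neg (by simp [hws])]
      have hS' : PySem.Chars.strip (cur ++ [ch]) = [ch] := by
        rw [PySem.Chars.strip, hL']
        show PySem.Chars.rstrip ([] ++ [ch]) = [ch]
        rw [pvRstrip_snoc, if_neg (by simp [hws])]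
        rfl
      rw [pvStep, if_pos (by simp [pvLineState, hL, hws])]
      simp [pvLineState, hL, hL', hS, hS', hws, List.contains_append, pvBeqComm]
  · have hne : ¬ (PySem.Chars.lstrip cur).isEmpty = true := by simp [hL]
    have hpos : 0 < (PySem.Chars.lstrip cur).length := List.length_pos_iff.mpr hL
    have hL' : PySem.Chars.lstrip (cur ++ [ch]) = PySem.Chars.lstrip cur ++ [ch] := by
      rw [pvLstrip_snoc, if_neg hne]
    have hbuf : (if ((PySem.Chars.lstrip cur).take 7).length < 7
          then (PySem.Chars.lstrip cur).take 7 ++ [ch]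
          else (PySem.Chars.lstrip cur).take 7)
        = (PySem.Chars.lstrip cur ++ [ch]).take 7 := by
      by_cases h7 : (PySem.Chars.lstrip cur).length < 7
      · rw [if_pos (by simp [List.length_take]; omega), List.take_append,
          List.take_of_length_le (l := PySem.Chars.lstrip cur) (by omega),
          List.take_of_length_le (l := [ch]) (by simp; omega)]
      · rw [if_neg (by simp [List.length_take]; omega), List.take_append,
          Nat.sub_eq_zero_of_le (by omega), List.take_zero, List.append_nil]
    by_cases hws : PySem.Chars.isspace ch = true
    · have hop : ch ≠ '(' := by intro h; rw [h] at hws; exact absurd hws (by decide)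
      have hcl : ch ≠ ')' := by intro h; rw [h] at hws; exact absurd hws (by decide)
      have hS' : PySem.Chars.strip (cur ++ [ch]) = PySem.Chars.strip cur := by
        rw [PySem.Chars.strip, hL', pvRstrip_snoc, if_pos hws, PySem.Chars.strip]
      rw [pvStep, if_pos (by simp [pvLineState]; omega)]
      simp only [pvLineState, hL', hS', hws, hbuf]
      simp [List.contains_append, hop, hcl, Ne.symm hop, Ne.symm hcl]
    · simp only [Bool.not_eq_true] at hws
      have hS' : PySem.Chars.strip (cur ++ [ch]) = PySem.Chars.lstrip cur ++ [ch] := by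
        rw [PySem.Chars.strip, hL', pvRstrip_snoc, if_neg (by simp [hws])]
      rw [pvStep, if_pos (by simp [pvLineState]; omega)]
      simp only [pvLineState, hL', hS', hws, hbuf]
      simp [List.contains_append, pvBeqComm]

theorem pvFinish_eq (g : Nat × Bool × Bool) (cur : List Char) :
    pvFinish g (pvLineState cur) = pvBump g (pvContrib cur) := by
  by_cases ht : PySem.Chars.strip cur = []
  · simp [pvFinish, pvLineState, pvContrib, pvBump, ht]
  · have hpos : 0 < (PySem.Chars.strip cur).length := List.length_pos_iff.mpr ht
    have hpre : PySem.Chars.strip cur <+: PySem.Chars.lstrip cur := by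
      rw [PySem.Chars.strip]; exact pvRstrip_prefix _
    have htake : ((PySem.Chars.lstrip cur).take 7).take (PySem.Chars.strip cur).length
        = (PySem.Chars.strip cur).take 7 := by
      have h1 : PySem.Chars.strip cur
          = (PySem.Chars.lstrip cur).take (PySem.Chars.strip cur).length :=
        List.prefix_iff_eq_take.mp hpre
      rw [List.take_take, Nat.min_comm, ← List.take_take, ← h1]
    have hmark : pvMarkersB.any
        (fun m => PySem.Chars.startswith
          (((PySem.Chars.lstrip cur).take 7).take (PySem.Chars.strip cur).length) m)
        = pvPm (PySem.Chars.strip cur) := by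
      rw [htake, pvPm]
      apply PySem.List.any_congr_mem
      intro m hm
      apply pvStartswith_take7
      fin_cases hm <;> decide
    have hopen : PySem.Chars.isIn ['('] (PySem.Chars.strip cur) = cur.contains '(' := by
      rw [pvIsIn_singleton, Bool.eq_iff_iff]
      simp [pvMem_strip '(' (by decide) cur]
    have hclose : PySem.Chars.isIn [')'] (PySem.Chars.strip cur) = cur.contains ')' := by
      rw [pvIsIn_singleton, Bool.eq_iff_iff]
      simp [pvMem_strip ')' (by decide) cur]
    simp only [pvFinish, pvLineState, pvContrib, pvBump, pvPp, hmark,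
      List.isEmpty_iff, ht, if_neg, hpos, if_pos, pvEndswith_colon _ ht, hopen, hclose]
    simp [ht, hpos]

theorem pvPrepend_nil (ls : List (List Char)) : pvPrepend [] ls = ls := by
  cases ls <;> simp [pvPrepend]

theorem pvPrepend_snoc (cs : List Char) (c : Char) (ls : List (List Char)) :
    pvPrepend (cs ++ [c]) ls = pvPrepend cs (pvConsHead c ls) := by
  cases ls <;> simp [pvPrepend, pvConsHead]

-- splitlines.go on domain input is pvSplit
theorem pvGo_eq (isB : Char → Bool)
    (hB : ∀ c, pvDomChar c = true → isB c = (c == '\n' || c == '\r'))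
    (s cur : List Char) (acc : List (List Char)) (hs : s.all pvDomChar = true) :
    PySem.Chars.splitlines.go isB s cur acc
      = acc.reverse ++ pvPrepend cur.reverse (pvSplit s) := by
  induction s, cur, acc using PySem.Chars.splitlines.go.induct isB with
  | case1 cur acc hcur =>
    simp_all [PySem.Chars.splitlines.go, pvSplit, pvPrepend]
  | case2 cur acc hcur =>
    simp_all [PySem.Chars.splitlines.go, pvSplit, pvPrepend]
  | case3 rest cur acc ih =>
    simp only [List.all_cons, Bool.and_eq_true] at hs
    rw [PySem.Chars.splitlines.go, ih hs.2.2]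
    cases hsp : pvSplit rest <;> simp [pvSplit, pvPrepend, hsp]
  | case4 c rest cur acc hpat hc ih =>
    simp only [List.all_cons, Bool.and_eq_true] at hs
    have hbr : c = '\n' ∨ c = '\r' := by
      have := hB c hs.1; rw [hc] at this
      rcases Bool.or_eq_true_iff.mp this.symm with h | h
      · exact Or.inl (eq_of_beq h)
      · exact Or.inr (eq_of_beq h)
    rw [PySem.Chars.splitlines.go.eq_def]
    split
    · simp_all
    · rename_i heq
      injection heq with h1 h2
      exact (hpat _ h1 h2).elim
    · rename_i c2 rest2 hpat2 heq
      injection heq with h1 h2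
      subst h1; subst h2
      rw [if_pos hc, ih hs.2]
      rcases hbr with hbr | hbr
      · subst hbr
        cases hsp : pvSplit rest <;> simp [pvSplit, pvPrepend, hsp]
      · subst hbr
        cases rest with
        | nil => simp [pvSplit, pvPrepend]
        | cons d rest' =>
          have hd : d ≠ '\n' := fun h => hpat rest' rfl (by rw [h])
          cases hsp : pvSplit (d :: rest') <;> simp [pvSplit, pvPrepend, hd, hsp]
  | case5 c rest cur acc hpat hc ih =>
    simp only [List.all_cons, Bool.and_eq_true] at hs
    have hbr : c ≠ '\n' ∧ c ≠ '\r' := by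
      have := hB c hs.1
      simp only [Bool.not_eq_true] at hc; rw [hc] at this
      constructor
      · intro h; subst h; simp at this
      · intro h; subst h; simp at this
    rw [PySem.Chars.splitlines.go.eq_def]
    split
    · simp_all
    · rename_i heq
      injection heq with h1 h2
      exact (hbr.2 h1).elim
    · rename_i c2 rest2 hpat2 heq
      injection heq with h1 h2
      subst h1; subst h2
      rw [if_neg hc, ih hs.2]
      have : pvSplit (c :: rest) = pvConsHead c (pvSplit rest) := by
        simp [pvSplit, hbr.1, hbr.2]
      rw [this, List.reverse_cons, pvPrepend_snoc]

theorem pvCharEqNat (c d : Char) : c = d ↔ c.toNat = d.toNat :=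
  ⟨fun h => by subst h; rfl, fun h => Char.ext (UInt32.toNat_inj.mp h)⟩

theorem pvSplitlines_eq (s : List Char) (hs : s.all pvDomChar = true) :
    PySem.Chars.splitlines s = pvSplit s := by
  unfold PySem.Chars.splitlines
  rw [pvGo_eq _ ?_ s [] [] hs]
  · simp [pvPrepend_nil]
  · intro c hc
    simp only [pvDomChar, Bool.or_eq_true, Bool.and_eq_true, decide_eq_true_eq, beq_iff_eq] at hc
    rw [Bool.eq_iff_iff]
    simp only [Bool.or_eq_true, decide_eq_true_eq, beq_iff_eq,
      pvCharEqNat c '\n', pvCharEqNat c '\r']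
    have h10 : '\n'.toNat = 10 := rfl
    have h13 : '\x0d'.toNat = 13 := rfl
    rw [h10, h13]
    omega

theorem pvScan_eq : ∀ (s cur : List Char) (g : Nat × Bool × Bool),
    pvScan s g (pvLineState cur) = pvStats (pvPrepend cur (pvSplit s)) g
  | [], cur, g => by
    rw [pvScan, pvSplit, pvFinish_eq]
    by_cases hc : cur.isEmpty = true
    · have hnil : cur = [] := List.isEmpty_iff.mp hc
      subst hnil
      simp [pvPrepend, pvStats, pvContrib, pvBump, PySem.Chars.strip,
        PySem.Chars.lstrip, PySem.Chars.rstrip]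
    · simp [pvPrepend, hc, pvStats]
  | c :: rest, cur, g => by
    rw [pvScan, pvSplit]
    split_ifs with h1 h2
    · rw [pvLine0_eq, pvFinish_eq, pvScan_eq rest.tail [] _, pvPrepend_nil]
      simp [pvPrepend, pvStats]
    · rw [pvLine0_eq, pvFinish_eq, pvScan_eq rest [] _, pvPrepend_nil]
      simp [pvPrepend, pvStats]
    · rw [pvStep_eq, pvScan_eq rest (cur ++ [c]) g, ← pvPrepend_snoc]
  termination_by s _ _ => s.length
  decreasing_by all_goals (simp [List.length_tail]; try omega)

-- stats unfolded to A's shape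
theorem pvStats_eq (lines : List (List Char)) (g : Nat × Bool × Bool) :
    pvStats lines g =
      (g.1 + ((lines.map PySem.Chars.strip).filter (fun t => !t.isEmpty)).length,
       g.2.1 || ((lines.map PySem.Chars.strip).filter (fun t => !t.isEmpty)).any pvPm,
       g.2.2 || ((lines.map PySem.Chars.strip).filter (fun t => !t.isEmpty)).any pvPp) := by
  induction lines generalizing g with
  | nil => simp [pvStats]
  | cons cs rest ih =>
    simp only [pvStats, List.foldl_cons] at *
    rw [ih]
    by_cases h : (PySem.Chars.strip cs).isEmpty <;>
      simp [pvContrib, pvBump, h, Nat.add_assoc, Bool.or_assoc, Nat.add_comm]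

-- A's counting foldl is countP
theorem pv_foldl_count {α : Type} (p : α → Bool) (xs : List α) (n : Nat) :
    xs.foldl (fun acc x => if p x then acc + 1 else acc) n = n + xs.countP p := by
  induction xs generalizing n with
  | nil => simp
  | cons x rest ih =>
    simp only [List.foldl_cons, List.countP_cons]
    split_ifs with h <;> rw [ih] <;> omega

theorem pv_countP_ge_one {α : Type} (p : α → Bool) (xs : List α) :
    decide (xs.countP p ≥ 1) = xs.any p := by
  rcases h : xs.any p with _ | _
  · simp only [List.any_eq_false] at h
    simp [List.countP_eq_zero.mpr h]
  · rw [List.any_eq_true] at h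
    obtain ⟨x, hx, hpx⟩ := h
    have := List.countP_pos_iff.mpr ⟨x, hx, hpx⟩
    exact decide_eq_true (by omega)

-- string-to-char bridges for A's predicates
theorem pvMarkersAB : pvMarkersB = pvMarkersA.map String.toList := by rfl

theorem pvPmS (l : String) :
    pvMarkersA.any (fun m => PySem.Str.startswith l m) = pvPm l.toList := by
  rw [pvPm, pvMarkersAB, List.any_map]
  apply PySem.List.any_congr_mem
  intro m _
  simp [PySem.Str.startswith_eq]

theorem pvPpS (l : String) :
    (PySem.Str.endswith l ":" || (PySem.Str.isIn "(" l && PySem.Str.isIn ")" l))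
      = pvPp l.toList := by
  rw [pvPp, PySem.Str.endswith_eq, PySem.Str.isIn_eq, PySem.Str.isIn_eq]
  rfl

theorem pvLines_eq (X : List String) :
    ((X.filter (fun l => decide (PySem.Str.strip l ≠ ""))).map PySem.Str.strip).map String.toList
      = ((X.map String.toList).map PySem.Chars.strip).filter (fun t => !t.isEmpty) := by
  induction X with
  | nil => rfl
  | cons l X ih =>
    simp only [List.map_cons, List.filter_cons, List.map_map, ne_eq, decide_not] at ih ⊢
    by_cases h : PySem.Chars.strip l.toList = []
    · have h' : PySem.Str.strip l = "" :=
        String.toList_inj.mp (by rw [PySem.Str.toList_strip, h]; rfl)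
      simp [h, h', ih]
    · have h' : ¬ PySem.Str.strip l = "" := fun hh =>
        h (by rw [← PySem.Str.toList_strip, hh]; rfl)
      simp [h, h', ih, PySem.Str.toList_strip]

-- ===== VERDICT (by name: the statement is the Claim_ definition above) =====
theorem looks_like_unfenced_code_py_spec : Claim_equal_looks_like_unfenced_code_py := by
  intro content hdom
  have hall : content.toList.all pvDomChar = true := hdom
  show looks_like_unfenced_code_py content = looks_like_unfenced_code_py_alt content
  -- the Str-level line list of A
  set L : List String := ((PySem.Str.splitlines content).filter
      (fun line => decide (PySem.Str.strip line ≠ ""))).map PySem.Str.strip with hLdef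
  -- the char-level line list of B
  set F : List (List Char) := ((pvSplit content.toList).map PySem.Chars.strip).filter
      (fun t => !t.isEmpty) with hFdef
  have hF : L.map String.toList = F := by
    rw [hLdef, pvLines_eq, PySem.Str.splitlines_map_toList, pvSplitlines_eq _ hall]
  have hlen : L.length = F.length := by
    rw [← hF]; exact (List.length_map _).symm
  have hany1 : L.any (fun line => pvMarkersA.any (fun m => PySem.Str.startswith line m))
      = F.any pvPm := by
    rw [← hF]
    conv_rhs => rw [List.any_map]
    apply PySem.List.any_congr_mem
    intro l _
    simpa using pvPmS l
  have hany2 : L.any (fun line => PySem.Str.endswith line ":"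
        || (PySem.Str.isIn "(" line && PySem.Str.isIn ")" line))
      = F.any pvPp := by
    rw [← hF]
    conv_rhs => rw [List.any_map]
    apply PySem.List.any_congr_mem
    intro l _
    simpa using pvPpS l
  -- reduce B to its stats form
  have hB : looks_like_unfenced_code_py_alt content
      = (decide (2 ≤ F.length) && (F.any pvPm && F.any pvPp)) := by
    unfold looks_like_unfenced_code_py_alt
    rw [pvLine0_eq, pvScan_eq, pvPrepend_nil, pvStats_eq]
    simp only [Nat.zero_add, Bool.false_or, ge_iff_le, Bool.and_assoc]
    rw [← hFdef]
  -- reduce A to the same form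
  have hA : looks_like_unfenced_code_py content
      = (decide (2 ≤ F.length) && (F.any pvPm && F.any pvPp)) := by
    simp only [looks_like_unfenced_code_py]
    rw [← hLdef]
    by_cases hl : L.length < 2
    · rw [if_pos hl]
      have : decide (2 ≤ F.length) = false := by
        rw [decide_eq_false_iff_not]; omega
      simp [this]
    · rw [if_neg hl, pv_foldl_count, pv_foldl_count, Nat.zero_add, Nat.zero_add,
        pv_countP_ge_one, pv_countP_ge_one, hany1, hany2]
      have : decide (2 ≤ F.length) = true := by
        rw [decide_eq_true_eq]; omega
      simp [this]
  rw [hA, hB]
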